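-- pv_equiv track=rewrite | github.com/nipreps-data/bootcamp-geneva-2024-dataset | code/reproin.py | _assign_run_on_repeat
-- ===== SOURCE A (Python) =====
-- from collections import Counter
--
-- def _assign_run_on_repeat(modality_items):
--     """
--     Assign run IDs for repeated inputs for a given modality.
--
--     Examples
--     --------
--     >>> _assign_run_on_repeat([
--     ...     {"item": "discard1", "acq": "bold", "dir": "PA"},
--     ...     {"item": "discard2", "acq": "bold", "dir": "AP"},
--     ...     {"item": "discard3", "acq": "bold", "dir": "PA"},
--     ... ])  # doctest: +NORMALIZE_WHITESPACE
--     [{'item': 'discard1', 'acq': 'bold', 'dir': 'PA', 'run_entity': '_run-1'},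
--      {'item': 'discard2', 'acq': 'bold', 'dir': 'AP'},
--      {'item': 'discard3', 'acq': 'bold', 'dir': 'PA', 'run_entity': '_run-2'}]
--
--     >>> _assign_run_on_repeat([
--     ...     {"item": "discard1", "acq": "bold", "dir": "PA"},
--     ...     {"item": "discard2", "acq": "bold", "dir": "AP"},
--     ...     {"item": "discard3", "acq": "bold", "dir": "PA"},
--     ...     {"item": "discard4", "acq": "bold", "dir": "AP"},
--     ... ])  # doctest: +NORMALIZE_WHITESPACE
--     [{'item': 'discard1', 'acq': 'bold', 'dir': 'PA', 'run_entity': '_run-1'},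
--      {'item': 'discard2', 'acq': 'bold', 'dir': 'AP', 'run_entity': '_run-1'},
--      {'item': 'discard3', 'acq': 'bold', 'dir': 'PA', 'run_entity': '_run-2'},
--      {'item': 'discard4', 'acq': 'bold', 'dir': 'AP', 'run_entity': '_run-2'}]
--
--     >>> _assign_run_on_repeat([
--     ...     {"item": "discard1", "acq": "bold", "dir": "PA", "run": "1"},
--     ...     {"item": "discard2", "acq": "bold", "dir": "AP"},
--     ...     {"item": "discard3", "acq": "bold", "dir": "PA", "run": "2"},
--     ... ])  # doctest: +NORMALIZE_WHITESPACE
--     [{'item': 'discard1', 'acq': 'bold', 'dir': 'PA', 'run': '1'},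
--      {'item': 'discard2', 'acq': 'bold', 'dir': 'AP'},
--      {'item': 'discard3', 'acq': 'bold', 'dir': 'PA', 'run': '2'}]
--
--     >>> _assign_run_on_repeat([
--     ...     {"item": "discard1", "acq": "bold", "dir": "PA", "run_entity": "_run-1"},
--     ...     {"item": "discard2", "acq": "bold", "dir": "AP"},
--     ...     {"item": "discard3", "acq": "bold", "dir": "PA", "run_entity": "_run-2"},
--     ... ])  # doctest: +NORMALIZE_WHITESPACE
--     [{'item': 'discard1', 'acq': 'bold', 'dir': 'PA', 'run_entity': '_run-1'},
--      {'item': 'discard2', 'acq': 'bold', 'dir': 'AP'},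
--      {'item': 'discard3', 'acq': 'bold', 'dir': 'PA', 'run_entity': '_run-2'}]
--
--     >>> _assign_run_on_repeat([
--     ...     {"item": "discard1", "acq": "bold", "dir": "PA", "part_entity": "_part-mag"},
--     ...     {"item": "discard2", "acq": "bold", "dir": "PA", "part_entity": "_part-phase"},
--     ...     {"item": "discard3", "acq": "bold", "dir": "AP", "part_entity": "_part-mag"},
--     ...     {"item": "discard4", "acq": "bold", "dir": "AP", "part_entity": "_part-phase"},
--     ... ])  # doctest: +NORMALIZE_WHITESPACE
--     [{'item': 'discard1', 'acq': 'bold', 'dir': 'PA', 'part_entity': '_part-mag'},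
--      {'item': 'discard2', 'acq': 'bold', 'dir': 'PA', 'part_entity': '_part-phase'},
--      {'item': 'discard3', 'acq': 'bold', 'dir': 'AP', 'part_entity': '_part-mag'},
--      {'item': 'discard4', 'acq': 'bold', 'dir': 'AP', 'part_entity': '_part-phase'}]
--
--     """
--     modality_items = modality_items.copy()
--
--     str_patterns = [
--         "_".join([f"{s[0]}-{s[1]}" for s in item.items() if s[0] != "item"])
--         for item in modality_items
--     ]
--     strcount = Counter(str_patterns)
--
--     for string, count in strcount.items():
--         if count < 2:
--             continue
--
--         runid = 1
--
--         for index, item_string in enumerate(str_patterns):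
--             if string == item_string:
--                 modality_items[index].update(
--                     {
--                         "run_entity": f"_run-{runid}",
--                     }
--                 )
--                 runid += 1
--
--     return modality_items
-- ===== SOURCE B (Python) =====
-- from collections import Counter
--
--
-- def _assign_run_on_repeat(modality_items):
--     """One pass with per-pattern running counters instead of one scan per
--     distinct repeated pattern. Returns the same values as the original;
--     builds new dicts instead of mutating the input items in place."""
--     str_patterns = [
--         "_".join(f"{k}-{v}" for k, v in item.items() if k != "item")
--         for item in modality_items
--     ]
--     total = Counter(str_patterns)
--     seen = {}
--     result = []
--     for item, pattern in zip(modality_items, str_patterns):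
--         if total[pattern] >= 2:
--             runid = seen.get(pattern, 0) + 1
--             seen[pattern] = runid
--             result.append({**item, "run_entity": f"_run-{runid}"})
--         else:
--             result.append(item)
--     return result
-- ===== Notes on version B (the rewrite author's own statement) =====
-- stated objective: alternative
-- what changed: Instead of rescanning the whole pattern list once per distinct repeated pattern, B makes a single pass keeping a per-pattern running counter dict (with precomputed totals), building a new output list rather than mutating the input dicts in place.
import Mathlib
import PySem

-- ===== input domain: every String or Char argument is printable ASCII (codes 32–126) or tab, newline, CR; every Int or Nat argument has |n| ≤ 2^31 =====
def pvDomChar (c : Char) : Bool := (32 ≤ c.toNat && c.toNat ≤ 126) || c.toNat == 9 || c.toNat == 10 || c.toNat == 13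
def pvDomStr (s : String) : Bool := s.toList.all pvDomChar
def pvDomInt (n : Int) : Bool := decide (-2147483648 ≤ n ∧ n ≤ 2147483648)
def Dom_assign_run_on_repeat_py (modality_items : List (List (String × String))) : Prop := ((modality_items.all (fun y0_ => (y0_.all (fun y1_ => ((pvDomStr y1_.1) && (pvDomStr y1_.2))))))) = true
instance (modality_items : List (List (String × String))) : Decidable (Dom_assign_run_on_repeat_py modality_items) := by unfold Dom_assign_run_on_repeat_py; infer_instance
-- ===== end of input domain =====

-- B replaces A's scan-per-distinct-repeated-pattern with ONE pass keeping per-pattern running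
-- counters; equal return values — Python A mutates the input dicts in place while B builds new
-- dicts, so the equivalence proved here is about the RETURN value only.

-- shared helper: the "_"-joined pattern string of an item (both Pythons compute it with this same expression)
def pvPattern (item : List (String × String)) : String :=
  PySem.Str.join "_" ((item.filter (fun s => s.1 != "item")).map (fun s => s.1 ++ "-" ++ s.2))

-- item.update({"run_entity": v}): dict overwrite (keeps position) or append
def pvSetRun (item : List (String × String)) (v : String) : List (String × String) :=
  ((PySem.Dict.mk item).insert "run_entity" v).items

-- ===== PORT A =====
def assign_run_on_repeat_py (modality_items : List (List (String × String))) : List (List (String × String)) :=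
  let str_patterns := modality_items.map pvPattern
  let strcount := PySem.Dict.counter str_patterns
  strcount.items.foldl
    (fun acc sc =>
      if sc.2 < 2 then acc
      else
        ((PySem.List.enumerate str_patterns).foldl
          (fun (st : List (List (String × String)) × Int) ip =>
            if sc.1 == ip.2 then
              (st.1.modify ip.1.toNat (fun it => pvSetRun it ("_run-" ++ PySem.Int.toStr st.2)), st.2 + 1)
            else st)
          (acc, 1)).1)
    modality_items

-- ===== PORT B =====
def assign_run_on_repeat_py_alt (modality_items : List (List (String × String))) : List (List (String × String)) :=
  let str_patterns := modality_items.map pvPattern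
  let total := PySem.Dict.counter str_patterns
  ((modality_items.zip str_patterns).foldl
    (fun (st : List (List (String × String)) × PySem.Dict String Int) ip =>
      if 2 ≤ total.getD ip.2 0 then
        let runid := st.2.getD ip.2 0 + 1
        (st.1 ++ [pvSetRun ip.1 ("_run-" ++ PySem.Int.toStr runid)], st.2.insert ip.2 runid)
      else
        (st.1 ++ [ip.1], st.2))
    ([], PySem.Dict.empty)).1

-- ===== PRECONDITION & SPEC =====
def Spec_assign_run_on_repeat_py (modality_items : List (List (String × String))) (out : List (List (String × String))) : Prop := out = assign_run_on_repeat_py_alt modality_items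
instance (modality_items : List (List (String × String))) (out : List (List (String × String))) : Decidable (Spec_assign_run_on_repeat_py modality_items out) := by unfold Spec_assign_run_on_repeat_py; infer_instance

-- ===== CLAIM (what is proved, stated in full; the proofs are below) =====
def Claim_equal_assign_run_on_repeat_py : Prop := ∀ (modality_items : List (List (String × String))), Dom_assign_run_on_repeat_py modality_items → Spec_assign_run_on_repeat_py modality_items (assign_run_on_repeat_py modality_items)

-- ===== LEMMAS AND PROOFS =====

-- A's inner loop (one scan for pattern σ, indices starting at s, runid starting at r), pointwise:
-- position j is updated iff its pattern is σ, with runid r + (#occurrences of σ before j).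
theorem pvInner (σ : String) (P0 : List String) (s : Nat) (l : List (List (String × String))) (r : Int) (j : Nat) :
    (((PySem.List.enumerate P0 (s : Int)).foldl
        (fun (st : List (List (String × String)) × Int) ip =>
          if σ == ip.2 then
            (st.1.modify ip.1.toNat (fun it => pvSetRun it ("_run-" ++ PySem.Int.toStr st.2)), st.2 + 1)
          else st)
        (l, r)).1)[j]?
    = if s ≤ j ∧ P0[j - s]? = some σ then
        (l[j]?).map (fun x => pvSetRun x ("_run-" ++ PySem.Int.toStr (r + ((P0.take (j - s)).count σ : Int))))
      else l[j]? := by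
  induction P0 generalizing s l r with
  | nil => simp [PySem.List.enumerate]
  | cons p rest ih =>
    rw [PySem.List.enumerate_cons, List.foldl_cons]
    have hcast : ((s : Int) + 1) = ((s + 1 : Nat) : Int) := by push_cast; ring
    rw [hcast]
    by_cases hp : σ = p
    · subst hp
      simp only [beq_self_eq_true, if_true, Int.toNat_natCast]
      rw [ih (s + 1) (l.modify s (fun it => pvSetRun it ("_run-" ++ PySem.Int.toStr r))) (r + 1)]
      rcases lt_trichotomy j s with hj | hj | hj
      · have h1 : ¬ (s + 1 ≤ j ∧ rest[j - (s+1)]? = some σ) := by omega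
        have h2 : ¬ (s ≤ j ∧ (σ :: rest)[j - s]? = some σ) := by rintro ⟨h, _⟩; omega
        rw [if_neg h1, if_neg h2, List.getElem?_modify]
        have hne : ¬ s = j := by omega
        cases l[j]? <;> simp [hne]
      · subst hj
        have h1 : ¬ (j + 1 ≤ j ∧ rest[j - (j+1)]? = some σ) := by omega
        have h2 : (j ≤ j ∧ (σ :: rest)[j - j]? = some σ) := by simp
        rw [if_neg h1, if_pos h2, List.getElem?_modify]
        simp only [Nat.sub_self, List.take_zero, List.count_nil, Nat.cast_zero, add_zero]
        cases l[j]? <;> simp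
      · have hd : j - s = (j - (s+1)) + 1 := by omega
        have harg : (r + 1) + ((rest.take (j - (s+1))).count σ : Int)
            = r + (((σ :: rest).take (j - s)).count σ : Int) := by
          rw [hd, List.take_succ_cons, List.count_cons]
          simp
          ring
        by_cases hc : rest[j - (s+1)]? = some σ
        · have h1 : (s + 1 ≤ j ∧ rest[j - (s+1)]? = some σ) := ⟨by omega, hc⟩
          have h2 : (s ≤ j ∧ (σ :: rest)[j - s]? = some σ) := by
            refine ⟨by omega, ?_⟩
            rw [hd, List.getElem?_cons_succ]; exact hc
          rw [if_pos h1, if_pos h2, List.getElem?_modify, harg]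
          have hne : ¬ s = j := by omega
          cases l[j]? <;> simp [hne]
        · have h1 : ¬ (s + 1 ≤ j ∧ rest[j - (s+1)]? = some σ) := by rintro ⟨_, h⟩; exact hc h
          have h2 : ¬ (s ≤ j ∧ (σ :: rest)[j - s]? = some σ) := by
            rintro ⟨_, h⟩; rw [hd, List.getElem?_cons_succ] at h; exact hc h
          rw [if_neg h1, if_neg h2, List.getElem?_modify]
          have hne : ¬ s = j := by omega
          cases l[j]? <;> simp [hne]
    · have hbeq : (σ == p) = false := by simp [hp]
      simp only [hbeq, Bool.false_eq_true, if_false]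
      rw [ih (s + 1) l r]
      rcases lt_trichotomy j s with hj | hj | hj
      · have h1 : ¬ (s + 1 ≤ j ∧ rest[j - (s+1)]? = some σ) := by omega
        have h2 : ¬ (s ≤ j ∧ (p :: rest)[j - s]? = some σ) := by rintro ⟨h, _⟩; omega
        rw [if_neg h1, if_neg h2]
      · subst hj
        have h1 : ¬ (j + 1 ≤ j ∧ rest[j - (j+1)]? = some σ) := by omega
        have h2 : ¬ (j ≤ j ∧ (p :: rest)[j - j]? = some σ) := by
          rintro ⟨_, h⟩; simp at h; exact hp h.symm
        rw [if_neg h1, if_neg h2]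
      · have hd : j - s = (j - (s+1)) + 1 := by omega
        have harg : r + ((rest.take (j - (s+1))).count σ : Int)
            = r + (((p :: rest).take (j - s)).count σ : Int) := by
          rw [hd, List.take_succ_cons, List.count_cons]
          have hb : (p == σ) = false := by simp; intro h; exact hp h.symm
          simp [hb]
        by_cases hc : rest[j - (s+1)]? = some σ
        · have h1 : (s + 1 ≤ j ∧ rest[j - (s+1)]? = some σ) := ⟨by omega, hc⟩
          have h2 : (s ≤ j ∧ (p :: rest)[j - s]? = some σ) := by
            refine ⟨by omega, ?_⟩
            rw [hd, List.getElem?_cons_succ]; exact hc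
          rw [if_pos h1, if_pos h2, harg]
        · have h1 : ¬ (s + 1 ≤ j ∧ rest[j - (s+1)]? = some σ) := by rintro ⟨_, h⟩; exact hc h
          have h2 : ¬ (s ≤ j ∧ (p :: rest)[j - s]? = some σ) := by
            rintro ⟨_, h⟩; rw [hd, List.getElem?_cons_succ] at h; exact hc h
          rw [if_neg h1, if_neg h2]

-- A's outer loop over the distinct patterns S, pointwise.
theorem pvOuter (P : List String) (S : List String) (hS : S.Nodup) (l : List (List (String × String))) (j : Nat) :
    (S.foldl
      (fun acc σ =>
        if ((List.count σ P : Int)) < 2 then acc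
        else
          ((PySem.List.enumerate P).foldl
            (fun (st : List (List (String × String)) × Int) ip =>
              if σ == ip.2 then
                (st.1.modify ip.1.toNat (fun it => pvSetRun it ("_run-" ++ PySem.Int.toStr st.2)), st.2 + 1)
              else st)
            (acc, 1)).1)
      l)[j]?
    = match P[j]? with
      | some p =>
          if p ∈ S ∧ 2 ≤ (List.count p P : Int) then
            (l[j]?).map (fun x => pvSetRun x ("_run-" ++ PySem.Int.toStr (1 + ((P.take j).count p : Int))))
          else l[j]?
      | none => l[j]? := by
  have hstep : ∀ (σ : String) (l : List (List (String × String))),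
      ((if ((List.count σ P : Int)) < 2 then l
        else
          ((PySem.List.enumerate P).foldl
            (fun (st : List (List (String × String)) × Int) ip =>
              if σ == ip.2 then
                (st.1.modify ip.1.toNat (fun it => pvSetRun it ("_run-" ++ PySem.Int.toStr st.2)), st.2 + 1)
              else st)
            (l, 1)).1)[j]?)
      = if P[j]? = some σ ∧ 2 ≤ (List.count σ P : Int) then
          (l[j]?).map (fun x => pvSetRun x ("_run-" ++ PySem.Int.toStr (1 + ((P.take j).count σ : Int))))
        else l[j]? := by
    intro σ l
    by_cases hc : ((List.count σ P : Int)) < 2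
    · rw [if_pos hc, if_neg (by rintro ⟨_, h⟩; omega)]
    · rw [if_neg hc]
      have hI := pvInner σ P 0 l 1 j
      simp only [Nat.cast_zero, Nat.sub_zero, Nat.zero_le, true_and] at hI
      rw [hI]
      by_cases hPj : P[j]? = some σ
      · rw [if_pos hPj, if_pos ⟨hPj, by omega⟩]
      · rw [if_neg hPj, if_neg (by rintro ⟨h, _⟩; exact hPj h)]
  induction S generalizing l with
  | nil =>
    simp only [List.foldl_nil]
    cases P[j]? with
    | none => rfl
    | some p => simp
  | cons σ S' ih =>
    rw [List.foldl_cons]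
    obtain ⟨hσ, hS'⟩ := List.nodup_cons.mp hS
    rw [ih hS']
    cases hPj : P[j]? with
    | none =>
      simp only
      rw [hstep σ l, if_neg (by rintro ⟨h, _⟩; rw [hPj] at h; simp at h)]
    | some p =>
      simp only
      by_cases h1 : p ∈ S' ∧ 2 ≤ (List.count p P : Int)
      · have hne : P[j]? = some σ → False := by
          intro h; rw [hPj] at h; injection h with h'
          exact hσ (h' ▸ h1.1)
        rw [if_pos h1, hstep σ l, if_neg (by rintro ⟨h, _⟩; exact hne h),
            if_pos ⟨List.mem_cons_of_mem σ h1.1, h1.2⟩]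
      · rw [if_neg h1]
        by_cases h2 : p = σ ∧ 2 ≤ (List.count p P : Int)
        · obtain ⟨h2a, h2b⟩ := h2
          subst h2a
          rw [hstep p l, if_pos ⟨hPj, h2b⟩, if_pos ⟨List.mem_cons_self, h2b⟩]
        · rw [hstep σ l]
          have hcf : ¬ (P[j]? = some σ ∧ 2 ≤ (List.count σ P : Int)) := by
            rintro ⟨h, hcnt⟩; rw [hPj] at h; injection h with h'
            exact h2 ⟨h', h' ▸ hcnt⟩
          rw [if_neg hcf]
          have hcf2 : ¬ (p ∈ σ :: S' ∧ 2 ≤ (List.count p P : Int)) := by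
            rintro ⟨hm, hcnt⟩
            rcases List.mem_cons.mp hm with h | h
            · exact h2 ⟨h, hcnt⟩
            · exact h1 ⟨h, hcnt⟩
          rw [if_neg hcf2]

-- B's loop: the output accumulator splits off the fold.
theorem pvBacc (total : PySem.Dict String Int) (l : List (List (String × String) × String))
    (acc : List (List (String × String))) (seen : PySem.Dict String Int) :
    l.foldl
      (fun (st : List (List (String × String)) × PySem.Dict String Int) ip =>
        if 2 ≤ total.getD ip.2 0 then
          (st.1 ++ [pvSetRun ip.1 ("_run-" ++ PySem.Int.toStr (st.2.getD ip.2 0 + 1))], st.2.insert ip.2 (st.2.getD ip.2 0 + 1))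
        else (st.1 ++ [ip.1], st.2))
      (acc, seen)
    = (acc ++ (l.foldl
        (fun (st : List (List (String × String)) × PySem.Dict String Int) ip =>
          if 2 ≤ total.getD ip.2 0 then
            (st.1 ++ [pvSetRun ip.1 ("_run-" ++ PySem.Int.toStr (st.2.getD ip.2 0 + 1))], st.2.insert ip.2 (st.2.getD ip.2 0 + 1))
          else (st.1 ++ [ip.1], st.2))
        ([], seen)).1,
       (l.foldl
        (fun (st : List (List (String × String)) × PySem.Dict String Int) ip =>
          if 2 ≤ total.getD ip.2 0 then
            (st.1 ++ [pvSetRun ip.1 ("_run-" ++ PySem.Int.toStr (st.2.getD ip.2 0 + 1))], st.2.insert ip.2 (st.2.getD ip.2 0 + 1))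
          else (st.1 ++ [ip.1], st.2))
        ([], seen)).2) := by
  induction l generalizing acc seen with
  | nil => simp
  | cons ip rest ih =>
    simp only [List.foldl_cons]
    by_cases hc : 2 ≤ total.getD ip.2 0
    · rw [if_pos hc, if_pos hc]
      simp only [List.nil_append]
      rw [ih, ih [pvSetRun ip.1 ("_run-" ++ PySem.Int.toStr (seen.getD ip.2 0 + 1))]]
      simp
    · rw [if_neg hc, if_neg hc]
      simp only [List.nil_append]
      rw [ih, ih [ip.1]]
      simp


-- B's loop, pointwise: position j gets runid seen[p] + (#occurrences of p among the first j+1 patterns).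
theorem pvBpt (total : PySem.Dict String Int) (l : List (List (String × String) × String))
    (seen : PySem.Dict String Int) (j : Nat) :
    ((l.foldl
      (fun (st : List (List (String × String)) × PySem.Dict String Int) ip =>
        if 2 ≤ total.getD ip.2 0 then
          (st.1 ++ [pvSetRun ip.1 ("_run-" ++ PySem.Int.toStr (st.2.getD ip.2 0 + 1))], st.2.insert ip.2 (st.2.getD ip.2 0 + 1))
        else (st.1 ++ [ip.1], st.2))
      ([], seen)).1)[j]?
    = (l[j]?).map (fun ip =>
        if 2 ≤ total.getD ip.2 0 then
          pvSetRun ip.1 ("_run-" ++ PySem.Int.toStr (seen.getD ip.2 0 + (((l.map Prod.snd).take (j + 1)).count ip.2 : Int)))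
        else ip.1) := by
  induction l generalizing seen j with
  | nil => simp
  | cons hd rest ih =>
    obtain ⟨it, p⟩ := hd
    simp only [List.foldl_cons]
    by_cases hc : 2 ≤ total.getD p 0
    · rw [if_pos hc, pvBacc]
      simp only [List.nil_append]
      cases j with
      | zero =>
        rw [List.getElem?_append_left (by simp)]
        simp [hc]
      | succ j =>
        rw [List.getElem?_append_right (by simp)]
        simp only [List.length_cons, List.length_nil, Nat.add_sub_cancel]
        rw [ih]
        cases hrj : rest[j]? with
        | none => simp [hrj]
        | some ipj =>
          simp only [Option.map_some, List.getElem?_cons_succ, hrj]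
          by_cases hcj : 2 ≤ total.getD ipj.2 0
          · rw [if_pos hcj, if_pos hcj]
            have harg : (seen.insert p (seen.getD p 0 + 1)).getD ipj.2 0 + (((rest.map Prod.snd).take (j + 1)).count ipj.2 : Int)
                = seen.getD ipj.2 0 + ((((it, p) :: rest).map Prod.snd).take (j + 1 + 1)).count ipj.2 := by
              simp only [List.map_cons, List.take_succ_cons, List.count_cons]
              by_cases hpq : ipj.2 = p
              · rw [hpq, PySem.Dict.getD_insert_self]
                push_cast
                simp
                ring
              · rw [PySem.Dict.getD_insert_of_ne _ _ _ hpq]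
                have : (p == ipj.2) = false := by simp; intro h; exact hpq h.symm
                simp [this]
            rw [harg]
          · rw [if_neg hcj, if_neg hcj]
    · rw [if_neg hc, pvBacc]
      simp only [List.nil_append]
      cases j with
      | zero =>
        rw [List.getElem?_append_left (by simp)]
        simp [hc]
      | succ j =>
        rw [List.getElem?_append_right (by simp)]
        simp only [List.length_cons, List.length_nil, Nat.add_sub_cancel]
        rw [ih]
        cases hrj : rest[j]? with
        | none => simp [hrj]
        | some ipj =>
          simp only [Option.map_some, List.getElem?_cons_succ, hrj]
          by_cases hcj : 2 ≤ total.getD ipj.2 0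
          · rw [if_pos hcj, if_pos hcj]
            have harg : seen.getD ipj.2 0 + (((rest.map Prod.snd).take (j + 1)).count ipj.2 : Int)
                = seen.getD ipj.2 0 + ((((it, p) :: rest).map Prod.snd).take (j + 1 + 1)).count ipj.2 := by
              simp only [List.map_cons, List.take_succ_cons, List.count_cons]
              by_cases hpq : ipj.2 = p
              · -- ipj.2 = p but then hcj contradicts hc
                exact absurd (hpq ▸ hcj) hc
              · have : (p == ipj.2) = false := by simp; intro h; exact hpq h.symm
                simp [this]
            rw [harg]
          · rw [if_neg hcj, if_neg hcj]

theorem pvMain (mi : List (List (String × String))) :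
    assign_run_on_repeat_py mi = assign_run_on_repeat_py_alt mi := by
  apply List.ext_getElem?
  intro j
  have hz : mi.zip (mi.map pvPattern) = mi.map (fun x => (x, pvPattern x)) := by
    simpa using @List.zip_map' _ _ _ id pvPattern mi
  simp only [assign_run_on_repeat_py, assign_run_on_repeat_py_alt,
    PySem.Dict.items_counter, List.foldl_map]
  rw [pvOuter (mi.map pvPattern) (PySem.Set.ofList (mi.map pvPattern))
      (PySem.Set.nodup_ofList _) mi j]
  rw [pvBpt (PySem.Dict.counter (mi.map pvPattern)) (mi.zip (mi.map pvPattern))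
      PySem.Dict.empty j]
  rw [hz]
  simp only [List.getElem?_map, List.map_map, Function.comp_def,
    PySem.Dict.getD_empty, PySem.Dict.getD_counter]
  cases hmj : mi[j]? with
  | none => simp
  | some it =>
    simp only [Option.map_some]
    have hmem : pvPattern it ∈ PySem.Set.ofList (mi.map pvPattern) :=
      (PySem.Set.mem_ofList _ _).mpr (List.mem_map_of_mem (List.mem_of_getElem? hmj))
    have htake : (mi.map pvPattern).take (j + 1) = (mi.map pvPattern).take j ++ [pvPattern it] := by
      rw [List.take_add_one]
      have hPj : (mi.map pvPattern)[j]? = some (pvPattern it) := by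
        rw [List.getElem?_map, hmj]; rfl
      rw [hPj]; rfl
    by_cases hcnt : 2 ≤ (List.count (pvPattern it) (mi.map pvPattern) : Int)
    · rw [if_pos ⟨hmem, hcnt⟩, if_pos hcnt]
      have harg : 1 + (((mi.map pvPattern).take j).count (pvPattern it) : Int)
          = 0 + (((mi.map pvPattern).take (j + 1)).count (pvPattern it) : Int) := by
        rw [htake, List.count_append]
        simp
        ring
      rw [harg]
    · rw [if_neg (by rintro ⟨_, h⟩; exact hcnt h), if_neg hcnt]

-- ===== VERDICT (by name: the statement is the Claim_ definition above) =====
theorem assign_run_on_repeat_py_spec : Claim_equal_assign_run_on_repeat_py := by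
  intro mi _
  unfold Spec_assign_run_on_repeat_py
  exact pvMain mi
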